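-- pv_equiv track=rewrite | github.com/JonatasDeOliveira/Projeto-RI | Ranker/ranker.py | minDist
-- ===== SOURCE A (Python) =====
-- def minDist(term1, term2, invertedFile):
--     if len(invertedFile.get(term1,[])) == 0:
--         return 150000
--     if len(invertedFile.get(term2,[])) == 0:
--         return 150000
--     minValue = 150000
--     list1 = invertedFile.get(term1)
--     list2 = invertedFile.get(term2)
--     l1 = range(0,len(list1))
--     l2 = range(0,len(list2))
--     for i in l1:
--         for j in l2:
--             if(abs(list2[j]-list1[i])<minValue):
--                 minValue = abs(list2[j]-list1[i])
--     return minValue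
-- ===== SOURCE B (Python) =====
-- def minDist(term1, term2, invertedFile):
--     list1 = invertedFile.get(term1, [])
--     list2 = invertedFile.get(term2, [])
--     if not list1 or not list2:
--         return 150000
--     a = sorted(list1)
--     b = sorted(list2)
--     best = 150000
--     i = 0
--     j = 0
--     while i < len(a) and j < len(b):
--         d = abs(a[i] - b[j])
--         if d < best:
--             best = d
--         if a[i] < b[j]:
--             i += 1
--         else:
--             j += 1
--     return best
-- ===== Notes on version B (the rewrite author's own statement) =====
-- stated objective: alternative
-- what changed: Replaces the all-pairs double loop over the two position lists by sorting both lists and a two-pointer merge scan for the minimum absolute difference.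
import Mathlib
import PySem

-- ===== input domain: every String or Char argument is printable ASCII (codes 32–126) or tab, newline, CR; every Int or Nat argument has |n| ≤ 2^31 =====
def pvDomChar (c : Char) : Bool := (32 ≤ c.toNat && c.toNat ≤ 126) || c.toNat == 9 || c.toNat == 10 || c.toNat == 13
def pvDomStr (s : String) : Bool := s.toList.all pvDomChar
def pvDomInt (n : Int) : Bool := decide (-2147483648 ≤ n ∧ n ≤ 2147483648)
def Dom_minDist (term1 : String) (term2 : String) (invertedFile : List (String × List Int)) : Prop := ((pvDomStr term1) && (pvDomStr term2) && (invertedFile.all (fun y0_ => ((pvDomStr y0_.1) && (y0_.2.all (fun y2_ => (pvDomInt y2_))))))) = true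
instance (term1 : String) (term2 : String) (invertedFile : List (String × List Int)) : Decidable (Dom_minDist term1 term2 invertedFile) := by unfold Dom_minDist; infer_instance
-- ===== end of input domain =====

-- B replaces A's all-pairs double loop by sorting both position lists and a two-pointer merge scan (objective: alternative).

-- dict.get(k, []) on the association list (first match), shared by both ports
def pvDictGet (d : List (String × List Int)) (k : String) : List Int :=
  match d.find? (fun p => p.1 == k) with
  | some p => p.2
  | none => []

-- ===== PORT A =====
def minDist (term1 : String) (term2 : String) (invertedFile : List (String × List Int)) : Int :=
  if (pvDictGet invertedFile term1).length == 0 then 150000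
  else if (pvDictGet invertedFile term2).length == 0 then 150000
  else
    let list1 := pvDictGet invertedFile term1
    let list2 := pvDictGet invertedFile term2
    let l1 := PySem.List.pyRange 0 (list1.length) 1
    let l2 := PySem.List.pyRange 0 (list2.length) 1
    l1.foldl (fun minValue i =>
      l2.foldl (fun minValue j =>
        if |PySem.List.pyGetD list2 j 0 - PySem.List.pyGetD list1 i 0| < minValue
        then |PySem.List.pyGetD list2 j 0 - PySem.List.pyGetD list1 i 0|
        else minValue) minValue) 150000

-- ===== PORT B =====
-- the while loop of Source B: advance the pointer at the smaller current element
def pvTwoPointer : List Int → List Int → Int → Int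
  | x :: xs, y :: ys, best =>
    let d := |x - y|
    let best' := if d < best then d else best
    if x < y then pvTwoPointer xs (y :: ys) best'
    else pvTwoPointer (x :: xs) ys best'
  | _, _, best => best
  termination_by a b _ => a.length + b.length

def minDist_alt (term1 : String) (term2 : String) (invertedFile : List (String × List Int)) : Int :=
  let list1 := pvDictGet invertedFile term1
  let list2 := pvDictGet invertedFile term2
  if list1.isEmpty || list2.isEmpty then 150000
  else
    pvTwoPointer (PySem.List.sorted list1 (fun x => x) false)
                 (PySem.List.sorted list2 (fun x => x) false) 150000

-- ===== PRECONDITION & SPEC =====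
def Spec_minDist (term1 : String) (term2 : String) (invertedFile : List (String × List Int)) (out : Int) : Prop := out = minDist_alt term1 term2 invertedFile
instance (term1 : String) (term2 : String) (invertedFile : List (String × List Int)) (out : Int) : Decidable (Spec_minDist term1 term2 invertedFile out) := by unfold Spec_minDist; infer_instance

-- ===== CLAIM (what is proved, stated in full; the proofs are below) =====
def Claim_equal_minDist : Prop := ∀ (term1 : String) (term2 : String) (invertedFile : List (String × List Int)), Dom_minDist term1 term2 invertedFile → Spec_minDist term1 term2 invertedFile (minDist term1 term2 invertedFile)

-- ===== LEMMAS AND PROOFS =====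

-- the multiset of pair distances A scans, in A's order
def pvVals (a b : List Int) : List Int :=
  a.flatMap (fun x => b.map (fun y => |y - x|))

theorem pvFoldlMin_le_init (l : List Int) (m : Int) : l.foldl min m ≤ m := by
  induction l generalizing m with
  | nil => simp
  | cons x xs ih => exact le_trans (ih (min m x)) (min_le_left m x)

theorem pvFoldlMin_le_mem (l : List Int) : ∀ (m z : Int), z ∈ l → l.foldl min m ≤ z := by
  induction l with
  | nil => intro _ _ hz; cases hz
  | cons x xs ih =>
    intro m z hz
    rcases List.mem_cons.mp hz with rfl | h
    · exact le_trans (pvFoldlMin_le_init xs (min m z)) (min_le_right m z)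
    · exact ih (min m x) z h

theorem pvLe_foldlMin (l : List Int) (m c : Int) (hm : c ≤ m) (hl : ∀ z ∈ l, c ≤ z) :
    c ≤ l.foldl min m := by
  induction l generalizing m with
  | nil => simpa
  | cons x xs ih =>
    exact ih (min m x) (le_min hm (hl x (List.mem_cons_self))) fun z hz => hl z (List.mem_cons_of_mem _ hz)

theorem pvFoldlMin_perm {l₁ l₂ : List Int} (h : l₁.Perm l₂) (m : Int) :
    l₁.foldl min m = l₂.foldl min m :=
  h.foldl_eq' (fun x _ y _ z => by rw [min_assoc, min_comm x y, ← min_assoc]) m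

theorem pvFoldl_flatMap (l : List Int) (g : Int → List Int) (i : Int) :
    (l.flatMap g).foldl min i = l.foldl (fun acc x => (g x).foldl min acc) i := by
  induction l generalizing i with
  | nil => rfl
  | cons x xs ih => simp [List.flatMap_cons, List.foldl_append, ih]

theorem pvIf_lt_min (d m : Int) : (if d < m then d else m) = min m d := by
  rcases lt_or_ge d m with h | h
  · simp [h, min_eq_right (le_of_lt h)]
  · simp [not_lt.mpr h, min_eq_left h]

-- A's value on nonempty lists is the fold of min over all pair distances
theorem pvA_eq_fold (list1 list2 : List Int) :
    (PySem.List.pyRange 0 (list1.length) 1).foldl (fun minValue i =>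
      (PySem.List.pyRange 0 (list2.length) 1).foldl (fun minValue j =>
        if |PySem.List.pyGetD list2 j 0 - PySem.List.pyGetD list1 i 0| < minValue
        then |PySem.List.pyGetD list2 j 0 - PySem.List.pyGetD list1 i 0|
        else minValue) minValue) 150000
    = (pvVals list1 list2).foldl min 150000 := by
  rw [pvVals, pvFoldl_flatMap]
  rw [PySem.List.foldl_pyRange_zero_pyGetD' list1 0
    (fun minValue x => (PySem.List.pyRange 0 (list2.length) 1).foldl (fun mv j =>
        if |PySem.List.pyGetD list2 j 0 - x| < mv then |PySem.List.pyGetD list2 j 0 - x| else mv) minValue) 150000]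
  congr 1
  funext acc x
  rw [PySem.List.foldl_pyRange_zero_pyGetD' list2 0
    (fun mv y => if |y - x| < mv then |y - x| else mv) acc]
  rw [List.foldl_map]
  congr 1
  funext a y
  exact pvIf_lt_min _ _

-- the two-pointer result never exceeds its running best
theorem pvTP_le_init (a b : List Int) (m : Int) : pvTwoPointer a b m ≤ m := by
  fun_induction pvTwoPointer a b m with
  | case1 x xs y ys m d best' hlt ih =>
    refine le_trans ih ?_
    simp only [best', d]
    split <;> omega
  | case2 x xs y ys m d best' hlt ih =>
    refine le_trans ih ?_
    simp only [best', d]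
    split <;> omega
  | case3 => exact le_refl _

-- on sorted lists the two-pointer result is a lower bound on every pair distance
theorem pvTP_le_pair (a b : List Int) (m : Int)
    (ha : a.Pairwise (· ≤ ·)) (hb : b.Pairwise (· ≤ ·)) :
    ∀ u ∈ a, ∀ v ∈ b, pvTwoPointer a b m ≤ |v - u| := by
  fun_induction pvTwoPointer a b m with
  | case1 x xs y ys m d best' hlt ih =>
    intro u hu v hv
    rcases List.mem_cons.mp hu with rfl | hu'
    · -- u = x: every v in y::ys has y ≤ v, and x < y, so |x - y| ≤ |v - x|
      have hyv : y ≤ v := by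
        rcases List.mem_cons.mp hv with rfl | hv'
        · exact le_refl v
        · exact (List.pairwise_cons.mp hb).1 v hv'
      have hd : d ≤ |v - u| := by
        simp only [d]
        rw [abs_sub_comm, abs_of_nonneg (by omega), abs_of_nonneg (by omega)]
        omega
      refine le_trans (pvTP_le_init _ _ _) (le_trans ?_ hd)
      simp only [best', d]
      split <;> omega
    · exact ih (List.pairwise_cons.mp ha).2 hb u hu' v hv
  | case2 x xs y ys m d best' hlt ih =>
    intro u hu v hv
    rcases List.mem_cons.mp hv with rfl | hv'
    · -- v = y: every u in x::xs has x ≤ u, and y ≤ x, so |x - y| ≤ |v - u|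
      have hxu : x ≤ u := by
        rcases List.mem_cons.mp hu with rfl | hu'
        · exact le_refl u
        · exact (List.pairwise_cons.mp ha).1 u hu'
      have hd : d ≤ |v - u| := by
        simp only [d]
        rw [abs_of_nonneg (by omega), abs_of_nonpos (by omega)]
        omega
      refine le_trans (pvTP_le_init _ _ _) (le_trans ?_ hd)
      simp only [best', d]
      split <;> omega
    · exact ih ha (List.pairwise_cons.mp hb).2 u hu v hv'
  | case3 a b m h =>
    intro u hu v hv
    rcases a with _ | ⟨x, xs⟩
    · cases hu
    · rcases b with _ | ⟨y, ys⟩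
      · cases hv
      · exact absurd rfl (fun hh => h x xs y ys hh rfl)

-- the two-pointer result is the initial best or some visited pair distance
theorem pvTP_cases (a b : List Int) (m : Int) :
    pvTwoPointer a b m = m ∨ ∃ u ∈ a, ∃ v ∈ b, pvTwoPointer a b m = |v - u| := by
  fun_induction pvTwoPointer a b m with
  | case1 x xs y ys m d best' hlt ih =>
    rcases ih with h | ⟨u, hu, v, hv, h⟩
    · rw [h]
      simp only [best', d]
      split
      · right
        exact ⟨x, List.mem_cons_self, y, List.mem_cons_self, abs_sub_comm x y⟩
      · left; rfl
    · right
      exact ⟨u, List.mem_cons_of_mem _ hu, v, hv, h⟩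
  | case2 x xs y ys m d best' hlt ih =>
    rcases ih with h | ⟨u, hu, v, hv, h⟩
    · rw [h]
      simp only [best', d]
      split
      · right
        exact ⟨x, List.mem_cons_self, y, List.mem_cons_self, abs_sub_comm x y⟩
      · left; rfl
    · right
      exact ⟨u, hu, v, List.mem_cons_of_mem _ hv, h⟩
  | case3 => exact Or.inl rfl

theorem pvMem_vals {a b : List Int} {u v : Int} (hu : u ∈ a) (hv : v ∈ b) :
    |v - u| ∈ pvVals a b := by
  simp only [pvVals, List.mem_flatMap, List.mem_map]
  exact ⟨u, hu, v, hv, rfl⟩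

theorem pvVals_mem {a b : List Int} {z : Int} (hz : z ∈ pvVals a b) :
    ∃ u ∈ a, ∃ v ∈ b, z = |v - u| := by
  simp only [pvVals, List.mem_flatMap, List.mem_map] at hz
  obtain ⟨u, hu, v, hv, h⟩ := hz
  exact ⟨u, hu, v, hv, h.symm⟩

-- on sorted lists the two-pointer scan computes the fold of min over all pair distances
theorem pvTP_eq_fold (a b : List Int) (m : Int)
    (ha : a.Pairwise (· ≤ ·)) (hb : b.Pairwise (· ≤ ·)) :
    pvTwoPointer a b m = (pvVals a b).foldl min m := by
  apply le_antisymm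
  · refine pvLe_foldlMin _ _ _ (pvTP_le_init a b m) ?_
    intro z hz
    obtain ⟨u, hu, v, hv, rfl⟩ := pvVals_mem hz
    exact pvTP_le_pair a b m ha hb u hu v hv
  · rcases pvTP_cases a b m with h | ⟨u, hu, v, hv, h⟩
    · rw [h]; exact pvFoldlMin_le_init _ _
    · rw [h]; exact pvFoldlMin_le_mem _ _ _ (pvMem_vals hu hv)

theorem pvVals_perm {a a' b b' : List Int} (h1 : a.Perm a') (h2 : b.Perm b') :
    (pvVals a b).Perm (pvVals a' b') :=
  h1.flatMap (fun x _ => h2.map _)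

-- ===== VERDICT (by name: the statement is the Claim_ definition above) =====
theorem minDist_spec : Claim_equal_minDist := by
  intro term1 term2 invertedFile _
  simp only [Spec_minDist, minDist, minDist_alt]
  by_cases e1 : pvDictGet invertedFile term1 = []
  · simp [e1]
  by_cases e2 : pvDictGet invertedFile term2 = []
  · simp [e2]
  rw [if_neg (by simp [List.length_eq_zero_iff, e1]),
      if_neg (by simp [List.length_eq_zero_iff, e2]),
      if_neg (by simp [List.isEmpty_iff, e1, e2])]
  rw [pvA_eq_fold]
  rw [pvTP_eq_fold _ _ 150000
    (by simpa using PySem.List.sorted_pairwise (pvDictGet invertedFile term1) (fun z => z))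
    (by simpa using PySem.List.sorted_pairwise (pvDictGet invertedFile term2) (fun z => z))]
  exact (pvFoldlMin_perm (pvVals_perm
    (PySem.List.sorted_perm (pvDictGet invertedFile term1) (fun x => x) false)
    (PySem.List.sorted_perm (pvDictGet invertedFile term2) (fun x => x) false)) 150000).symm
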